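-- pv_equiv track=rewrite | github.com/Jeru-John/ML-case-studies | Hackkerrank Artificial Intellligence Solutions/Bot_Saving_Princess.py | rescue_princess
-- ===== SOURCE A (Python) =====
-- def find_princess_position(grid):
--     for i in range(len(grid)):
--         for j in range(len(grid[i])):
--             if grid[i][j] == 'p':
--                 return i, j
--
-- def find_bot_position(grid):
--     for i in range(len(grid)):
--         for j in range(len(grid[i])):
--             if grid[i][j] == 'm':
--                 return i, j
--
-- def rescue_princess(grid):
--     bot_position = find_bot_position(grid)
--     princess_position = find_princess_position(grid)
--
--     moves = []
--
--     while bot_position != princess_position: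
--         bot_row, bot_col = bot_position
--         princess_row, princess_col = princess_position
--
--         if bot_row < princess_row:
--             moves.append('DOWN')
--             bot_row += 1
--         elif bot_row > princess_row:
--             moves.append('UP')
--             bot_row -= 1
--
--         if bot_col < princess_col:
--             moves.append('RIGHT')
--             bot_col += 1
--         elif bot_col > princess_col:
--             moves.append('LEFT')
--             bot_col -= 1
--
--         bot_position = (bot_row, bot_col)
--
--     return moves
-- ===== SOURCE B (Python) =====
-- def find_char(grid, ch):
--     for i, row in enumerate(grid):
--         for j, c in enumerate(row):
--             if c == ch:
--                 return i, j
--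
-- def rescue_princess(grid):
--     bot = find_char(grid, 'm')
--     princess = find_char(grid, 'p')
--     if bot == princess:
--         return []
--     br, bc = bot
--     pr, pc = princess
--     dr, dc = pr - br, pc - bc
--     vert = ['DOWN'] * dr if dr > 0 else ['UP'] * (-dr)
--     horiz = ['RIGHT'] * dc if dc > 0 else ['LEFT'] * (-dc)
--     moves = []
--     for v, h in zip(vert, horiz):
--         moves.append(v)
--         moves.append(h)
--     k = min(len(vert), len(horiz))
--     return moves + vert[k:] + horiz[k:]
-- ===== Notes on version B (the rewrite author's own statement) =====
-- stated objective: alternative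
-- what changed: A walks the bot step by step in a while loop, appending one vertical and one horizontal move per iteration; B computes the row/column differences once, builds the vertical and horizontal move lists by replication and interleaves them with zip plus the longer tail (no simulated walk).
import Mathlib
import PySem

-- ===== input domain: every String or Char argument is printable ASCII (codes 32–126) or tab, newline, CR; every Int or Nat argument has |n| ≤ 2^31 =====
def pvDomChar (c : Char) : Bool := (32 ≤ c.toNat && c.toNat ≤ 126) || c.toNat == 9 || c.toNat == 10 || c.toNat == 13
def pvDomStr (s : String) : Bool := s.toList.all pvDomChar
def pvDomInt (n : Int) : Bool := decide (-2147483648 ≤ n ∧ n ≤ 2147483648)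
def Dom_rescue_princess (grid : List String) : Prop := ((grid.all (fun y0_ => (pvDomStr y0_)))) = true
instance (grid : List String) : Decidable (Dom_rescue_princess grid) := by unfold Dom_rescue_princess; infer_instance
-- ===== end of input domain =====

-- B replaces A's step-by-step walking loop by a direct construction: it builds the vertical
-- and horizontal move lists from the coordinate differences and interleaves them (objective:
-- alternative decomposition, same cost).

-- A-side helper: counter-carrying nested row/column scan returning the first (i, j)
def scanRowPV (c : Char) (i : Int) (row : List Char) (j : Int) : Option (Int × Int) :=
  match row with
  | [] => none
  | x :: rest => if x = c then some (i, j) else scanRowPV c i rest (j + 1)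

def scanGridPV (c : Char) (grid : List String) (i : Int) : Option (Int × Int) :=
  match grid with
  | [] => none
  | r :: rest =>
    match scanRowPV c i r.toList 0 with
    | some p => some p
    | none => scanGridPV c rest (i + 1)

-- ===== PORT A =====
def find_princess_position (grid : List String) : Option (Int × Int) := scanGridPV 'p' grid 0

def find_bot_position (grid : List String) : Option (Int × Int) := scanGridPV 'm' grid 0

-- A's while loop, both positions found (the mixed some/none case raises in Python, outside Pre_).
-- 'fuel' is only a structural termination bound: the caller passes the |Δrow|+|Δcol| distance,
-- which the loop never exhausts before bot = pr (proved in rescueLoopA_eq_buildB below).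
def rescueLoopA (fuel : Nat) (bot pr : Int × Int) (moves : List String) : List String :=
  match fuel with
  | 0 => moves
  | fuel + 1 =>
    if bot = pr then moves
    else
      let br := bot.1; let bc := bot.2
      let prow := pr.1; let pcol := pr.2
      let s1 : List String × Int :=
        if br < prow then (moves ++ ["DOWN"], br + 1)
        else if br > prow then (moves ++ ["UP"], br - 1)
        else (moves, br)
      let s2 : List String × Int :=
        if bc < pcol then (s1.1 ++ ["RIGHT"], bc + 1)
        else if bc > pcol then (s1.1 ++ ["LEFT"], bc - 1)
        else (s1.1, bc)
      rescueLoopA fuel (s1.2, s2.2) pr s2.1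

def rescue_princess (grid : List String) : List String :=
  match find_bot_position grid, find_princess_position grid with
  | some b, some p => rescueLoopA ((p.1 - b.1).natAbs + (p.2 - b.2).natAbs) b p []
  | _, _ => []    -- both none: loop never entered, [] (mixed some/none raises in Python: outside Pre_)

-- ===== PORT B =====
-- B's generic finder: same first-occurrence semantics, offset-on-return recursion
def findColB (ch : Char) (row : List Char) : Option Nat :=
  match row with
  | [] => none
  | c :: rest => if c = ch then some 0 else (findColB ch rest).map (· + 1)

def find_char (grid : List String) (ch : Char) : Option (Int × Int) :=
  match grid with
  | [] => none
  | r :: rest =>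
    match findColB ch r.toList with
    | some j => some (0, (j : Int))
    | none => (find_char rest ch).map (fun p => (p.1 + 1, p.2))

def rescue_princess_alt (grid : List String) : List String :=
  let bot := find_char grid 'm'
  let princess := find_char grid 'p'
  if bot = princess then []
  else
    match bot with
    | none => []    -- mixed some/none: Python B raises here (outside Pre_), like Python A
    | some b =>
      match princess with
      | none => []
      | some p =>
      let br := b.1; let bc := b.2
      let prow := p.1; let pcol := p.2
      let dr := prow - br
      let dc := pcol - bc
      let vert := if dr > 0 then List.replicate dr.toNat "DOWN" else List.replicate (-dr).toNat "UP"
      let horiz := if dc > 0 then List.replicate dc.toNat "RIGHT" else List.replicate (-dc).toNat "LEFT"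
      let moves := (vert.zip horiz).foldl (fun acc vh => acc ++ [vh.1, vh.2]) []
      let k := min vert.length horiz.length
      moves ++ vert.drop k ++ horiz.drop k

-- ===== PRECONDITION & SPEC =====
-- Pre_ excludes grids containing exactly one of the characters 'm' and 'p': there both
-- Pythons raise TypeError (unpacking None next to a found position).
def Pre_rescue_princess (grid : List String) : Prop :=
  (grid.any fun s => s.toList.contains 'm') = (grid.any fun s => s.toList.contains 'p')
instance (grid : List String) : Decidable (Pre_rescue_princess grid) := by unfold Pre_rescue_princess; infer_instance

def pvWitness_rescue_princess : List String := ["--p", "m--"]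

def Spec_rescue_princess (grid : List String) (out : List String) : Prop := out = rescue_princess_alt grid
instance (grid : List String) (out : List String) : Decidable (Spec_rescue_princess grid out) := by unfold Spec_rescue_princess; infer_instance

-- ===== CLAIM (what is proved, stated in full; the proofs are below) =====
def Claim_equal_rescue_princess : Prop := ∀ (grid : List String), Dom_rescue_princess grid → Pre_rescue_princess grid → Spec_rescue_princess grid (rescue_princess grid)

-- ===== LEMMAS AND PROOFS =====

-- B's move construction as a function of the coordinate differences
def buildB (dr dc : Int) : List String :=
  let vert := if dr > 0 then List.replicate dr.toNat "DOWN" else List.replicate (-dr).toNat "UP"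
  let horiz := if dc > 0 then List.replicate dc.toNat "RIGHT" else List.replicate (-dc).toNat "LEFT"
  let moves := (vert.zip horiz).foldl (fun acc vh => acc ++ [vh.1, vh.2]) []
  let k := min vert.length horiz.length
  moves ++ vert.drop k ++ horiz.drop k

-- the same construction over non-negative counts with fixed move names
def natBuild (a b : ℕ) (v h : String) : List String :=
  ((List.replicate a v).zip (List.replicate b h)).flatMap (fun p => [p.1, p.2])
    ++ (List.replicate a v).drop (min a b) ++ (List.replicate b h).drop (min a b)

theorem buildB_eq_natBuild (dr dc : Int) :
    buildB dr dc = natBuild (if dr > 0 then dr.toNat else (-dr).toNat)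
                            (if dc > 0 then dc.toNat else (-dc).toNat)
                            (if dr > 0 then "DOWN" else "UP")
                            (if dc > 0 then "RIGHT" else "LEFT") := by
  unfold buildB natBuild
  split_ifs <;> simp [List.flatMap_replicate]

theorem natBuild_ss (a b : ℕ) (v h : String) :
    natBuild (a+1) (b+1) v h = v :: h :: natBuild a b v h := by
  simp [natBuild, List.replicate_succ]

theorem natBuild_s0 (a : ℕ) (v h : String) :
    natBuild (a+1) 0 v h = v :: natBuild a 0 v h := by
  simp [natBuild, List.replicate_succ]

theorem natBuild_0s (b : ℕ) (v h : String) :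
    natBuild 0 (b+1) v h = h :: natBuild 0 b v h := by
  simp [natBuild, List.replicate_succ]

theorem natBuild_zl (b : ℕ) (v h : String) : natBuild 0 b v h = List.replicate b h := by
  simp [natBuild]

theorem natBuild_zr (a : ℕ) (v h : String) : natBuild a 0 v h = List.replicate a v := by
  simp [natBuild]

-- region lemmas: buildB on each sign region as natBuild with fixed names
theorem buildB_nn (dr dc : Int) (h1 : 0 ≤ dr) (h2 : 0 ≤ dc) :
    buildB dr dc = natBuild dr.toNat dc.toNat "DOWN" "RIGHT" := by
  rw [buildB_eq_natBuild]
  split_ifs with hd hc hc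
  · rfl
  · have h : dc = 0 := by omega
    subst h; simp [natBuild_zr]
  · have h : dr = 0 := by omega
    subst h; simp [natBuild_zl]
  · have h : dr = 0 := by omega
    have h' : dc = 0 := by omega
    subst h; subst h'; simp [natBuild_zl]

theorem buildB_np (dr dc : Int) (h1 : 0 ≤ dr) (h2 : dc ≤ 0) :
    buildB dr dc = natBuild dr.toNat (-dc).toNat "DOWN" "LEFT" := by
  rw [buildB_eq_natBuild]
  split_ifs with hd hc hc
  · omega
  · rfl
  · omega
  · have h : dr = 0 := by omega
    subst h; simp [natBuild_zl]

theorem buildB_pn (dr dc : Int) (h1 : dr ≤ 0) (h2 : 0 ≤ dc) :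
    buildB dr dc = natBuild (-dr).toNat dc.toNat "UP" "RIGHT" := by
  rw [buildB_eq_natBuild]
  split_ifs with hd hc hc
  · omega
  · omega
  · rfl
  · have h : dc = 0 := by omega
    subst h; simp [natBuild_zr]

theorem buildB_pp (dr dc : Int) (h1 : dr ≤ 0) (h2 : dc ≤ 0) :
    buildB dr dc = natBuild (-dr).toNat (-dc).toNat "UP" "LEFT" := by
  rw [buildB_eq_natBuild]
  split_ifs with hd hc hc
  · omega
  · omega
  · omega
  · rfl

-- one-step unfoldings of buildB, matching one iteration of A's loop
theorem step_DR (dr dc : Int) (h1 : 0 < dr) (h2 : 0 < dc) :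
    buildB dr dc = "DOWN" :: "RIGHT" :: buildB (dr-1) (dc-1) := by
  rw [buildB_nn dr dc h1.le h2.le, buildB_nn _ _ (by omega) (by omega),
      show dr.toNat = (dr-1).toNat + 1 by omega, show dc.toNat = (dc-1).toNat + 1 by omega,
      natBuild_ss]

theorem step_DL (dr dc : Int) (h1 : 0 < dr) (h2 : dc < 0) :
    buildB dr dc = "DOWN" :: "LEFT" :: buildB (dr-1) (dc+1) := by
  rw [buildB_np dr dc h1.le h2.le, buildB_np _ _ (by omega) (by omega),
      show dr.toNat = (dr-1).toNat + 1 by omega, show (-dc).toNat = (-(dc+1)).toNat + 1 by omega,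
      natBuild_ss]

theorem step_D (dr : Int) (h1 : 0 < dr) :
    buildB dr 0 = "DOWN" :: buildB (dr-1) 0 := by
  rw [buildB_nn dr 0 h1.le le_rfl, buildB_nn _ _ (by omega) le_rfl,
      show dr.toNat = (dr-1).toNat + 1 by omega]
  simp [natBuild_s0]

theorem step_UR (dr dc : Int) (h1 : dr < 0) (h2 : 0 < dc) :
    buildB dr dc = "UP" :: "RIGHT" :: buildB (dr+1) (dc-1) := by
  rw [buildB_pn dr dc h1.le h2.le, buildB_pn _ _ (by omega) (by omega),
      show (-dr).toNat = (-(dr+1)).toNat + 1 by omega, show dc.toNat = (dc-1).toNat + 1 by omega,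
      natBuild_ss]

theorem step_UL (dr dc : Int) (h1 : dr < 0) (h2 : dc < 0) :
    buildB dr dc = "UP" :: "LEFT" :: buildB (dr+1) (dc+1) := by
  rw [buildB_pp dr dc h1.le h2.le, buildB_pp _ _ (by omega) (by omega),
      show (-dr).toNat = (-(dr+1)).toNat + 1 by omega, show (-dc).toNat = (-(dc+1)).toNat + 1 by omega,
      natBuild_ss]

theorem step_U (dr : Int) (h1 : dr < 0) :
    buildB dr 0 = "UP" :: buildB (dr+1) 0 := by
  rw [buildB_pn dr 0 h1.le le_rfl, buildB_pn _ _ (by omega) le_rfl,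
      show (-dr).toNat = (-(dr+1)).toNat + 1 by omega]
  simp [natBuild_s0]

theorem step_R (dc : Int) (h2 : 0 < dc) :
    buildB 0 dc = "RIGHT" :: buildB 0 (dc-1) := by
  rw [buildB_nn 0 dc le_rfl h2.le, buildB_nn _ _ le_rfl (by omega),
      show dc.toNat = (dc-1).toNat + 1 by omega]
  simp [natBuild_0s]

theorem step_L (dc : Int) (h2 : dc < 0) :
    buildB 0 dc = "LEFT" :: buildB 0 (dc+1) := by
  rw [buildB_np 0 dc le_rfl h2.le, buildB_np _ _ le_rfl (by omega),
      show (-dc).toNat = (-(dc+1)).toNat + 1 by omega]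
  simp [natBuild_0s]

theorem buildB_00 : buildB 0 0 = [] := by
  rw [buildB_nn 0 0 le_rfl le_rfl]; simp [natBuild_zl]

theorem rescueLoopA_eq_buildB :
    ∀ (n : ℕ) (br bc prow pcol : Int) (acc : List String),
      (prow - br).natAbs + (pcol - bc).natAbs ≤ n →
      rescueLoopA n (br, bc) (prow, pcol) acc = acc ++ buildB (prow - br) (pcol - bc) := by
  intro n
  induction n with
  | zero =>
    intro br bc prow pcol acc hn
    have h1 : br = prow := by omega
    have h2 : bc = pcol := by omega
    subst h1; subst h2
    simp [rescueLoopA, buildB_00]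
  | succ n ih =>
    intro br bc prow pcol acc hn
    by_cases heq : ((br, bc) : Int × Int) = (prow, pcol)
    · obtain ⟨h1, h2⟩ := Prod.mk.injEq .. ▸ heq
      rw [rescueLoopA, if_pos heq, h1, h2]
      simp [buildB_00]
    · rw [rescueLoopA, if_neg heq]
      have hne : br ≠ prow ∨ bc ≠ pcol := by
        by_contra h
        push_neg at h
        exact heq (by simp [h.1, h.2])
      rcases lt_trichotomy br prow with hr | hr | hr <;>
        rcases lt_trichotomy bc pcol with hc | hc | hc
      · -- DOWN RIGHT
        simp only [if_pos hr, if_pos hc]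
        rw [ih (br+1) (bc+1) prow pcol _ (by omega),
            step_DR (prow - br) (pcol - bc) (by omega) (by omega),
            show prow - (br+1) = prow - br - 1 by ring,
            show pcol - (bc+1) = pcol - bc - 1 by ring]
        simp
      · -- DOWN only
        subst hc
        simp only [if_pos hr, lt_irrefl, if_false, if_neg (lt_irrefl bc), if_neg (not_lt.mpr le_rfl)]
        rw [ih (br+1) bc prow bc _ (by omega),
            show bc - bc = 0 by ring]
        rw [step_D (prow - br) (by omega),
            show prow - (br+1) = prow - br - 1 by ring]
        simp [show bc - bc = 0 by ring]
      · -- DOWN LEFT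
        simp only [if_pos hr, if_neg (not_lt.mpr hc.le), if_pos hc]
        rw [ih (br+1) (bc-1) prow pcol _ (by omega),
            step_DL (prow - br) (pcol - bc) (by omega) (by omega),
            show prow - (br+1) = prow - br - 1 by ring,
            show pcol - (bc-1) = pcol - bc + 1 by ring]
        simp
      · -- RIGHT only
        subst hr
        simp only [lt_irrefl, if_false, if_neg (lt_irrefl br), if_neg (not_lt.mpr le_rfl), if_pos hc]
        rw [ih br (bc+1) br pcol _ (by omega),
            show br - br = 0 by ring,
            step_R (pcol - bc) (by omega),
            show pcol - (bc+1) = pcol - bc - 1 by ring]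
        simp [show br - br = 0 by ring]
      · -- both equal: contradiction
        exact absurd (by simp [hr, hc]) heq
      · -- LEFT only
        subst hr
        simp only [lt_irrefl, if_false, if_neg (lt_irrefl br), if_neg (not_lt.mpr le_rfl),
                   if_neg (not_lt.mpr hc.le), if_pos hc]
        rw [ih br (bc-1) br pcol _ (by omega),
            show br - br = 0 by ring,
            step_L (pcol - bc) (by omega),
            show pcol - (bc-1) = pcol - bc + 1 by ring]
        simp [show br - br = 0 by ring]
      · -- UP RIGHT
        simp only [if_neg (not_lt.mpr hr.le), if_pos hr, if_pos hc]
        rw [ih (br-1) (bc+1) prow pcol _ (by omega),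
            step_UR (prow - br) (pcol - bc) (by omega) (by omega),
            show prow - (br-1) = prow - br + 1 by ring,
            show pcol - (bc+1) = pcol - bc - 1 by ring]
        simp
      · -- UP only
        subst hc
        simp only [if_neg (not_lt.mpr hr.le), if_pos hr, lt_irrefl, if_false,
                   if_neg (lt_irrefl bc), if_neg (not_lt.mpr le_rfl)]
        rw [ih (br-1) bc prow bc _ (by omega),
            show bc - bc = 0 by ring,
            step_U (prow - br) (by omega),
            show prow - (br-1) = prow - br + 1 by ring]
        simp [show bc - bc = 0 by ring]
      · -- UP LEFT
        simp only [if_neg (not_lt.mpr hr.le), if_pos hr, if_neg (not_lt.mpr hc.le), if_pos hc]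
        rw [ih (br-1) (bc-1) prow pcol _ (by omega),
            step_UL (prow - br) (pcol - bc) (by omega) (by omega),
            show prow - (br-1) = prow - br + 1 by ring,
            show pcol - (bc-1) = pcol - bc + 1 by ring]
        simp

theorem scanRowPV_eq_findColB (c : Char) (row : List Char) :
    ∀ (i j : Int), scanRowPV c i row j = (findColB c row).map (fun k => (i, j + (k : Int))) := by
  induction row with
  | nil => intro i j; simp [scanRowPV, findColB]
  | cons x rest ih =>
    intro i j
    by_cases h : x = c
    · simp [scanRowPV, findColB, h]
    · simp only [scanRowPV, findColB, if_neg h, ih i (j + 1)]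
      cases findColB c rest with
      | none => simp
      | some k => simp; omega

theorem scanGridPV_eq_find_char (c : Char) (grid : List String) :
    ∀ (i : Int), scanGridPV c grid i = (find_char grid c).map (fun p => (i + p.1, p.2)) := by
  induction grid with
  | nil => intro i; simp [scanGridPV, find_char]
  | cons r rest ih =>
    intro i
    simp only [scanGridPV, find_char, scanRowPV_eq_findColB c r.toList i 0]
    cases findColB c r.toList with
    | none =>
      simp only [Option.map_none]
      rw [ih (i + 1)]
      cases find_char rest c with
      | none => simp
      | some p => simp; omega
    | some j => simp

theorem scanGridPV_zero (c : Char) (grid : List String) :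
    scanGridPV c grid 0 = find_char grid c := by
  rw [scanGridPV_eq_find_char c grid 0]
  cases h : find_char grid c with
  | none => simp
  | some p => simp

theorem ports_agree (grid : List String) :
    rescue_princess grid = rescue_princess_alt grid := by
  unfold rescue_princess rescue_princess_alt find_bot_position find_princess_position
  rw [scanGridPV_zero, scanGridPV_zero]
  cases hb : find_char grid 'm' with
  | none =>
    cases hp : find_char grid 'p' with
    | none => simp
    | some p => simp
  | some b =>
    cases hp : find_char grid 'p' with
    | none => simp
    | some p =>
      obtain ⟨br, bc⟩ := b
      obtain ⟨prow, pcol⟩ := p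
      by_cases h : ((br, bc) : Int × Int) = (prow, pcol)
      · obtain ⟨h1, h2⟩ := Prod.mk.injEq .. ▸ h
        subst h1; subst h2
        dsimp only
        rw [rescueLoopA_eq_buildB _ br bc br bc [] le_rfl]
        simp [show br - br = (0:Int) by ring, show bc - bc = (0:Int) by ring, buildB_00]
      · dsimp only
        rw [rescueLoopA_eq_buildB _ br bc prow pcol [] le_rfl]
        simp only [List.nil_append]
        rw [buildB]
        simp [h]

-- ===== VERDICT (by name: the statement is the Claim_ definition above) =====
theorem rescue_princess_spec : Claim_equal_rescue_princess := by
  intro grid _ _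
  exact ports_agree grid
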